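-- pv_equiv track=rewrite | github.com/Jirehlov/SiglusSceneScriptUtility | src/siglus_ssu/lsp.py | _line_start_offsets
-- ===== SOURCE A (Python) =====
-- def _line_start_offsets(text: str) -> list[int]:
--     out: list[int] = []
--     offset = 0
--     for line in text.split("\n"):
--         out.append(offset)
--         offset += len(line) + 1
--     if not out:
--         out.append(0)
--     return out
-- ===== SOURCE B (Python) =====
-- def _line_start_offsets(text: str) -> list[int]:
--     out = [0]
--     for i, ch in enumerate(text):
--         if ch == "\n":
--             out.append(i + 1)
--     return out
-- ===== Notes on version B (the rewrite author's own statement) =====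
-- stated objective: simpler
-- what changed: B scans the raw characters once, seeding out with [0] and appending i+1 at each newline, instead of splitting the text into lines and accumulating substring lengths.
import Mathlib
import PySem

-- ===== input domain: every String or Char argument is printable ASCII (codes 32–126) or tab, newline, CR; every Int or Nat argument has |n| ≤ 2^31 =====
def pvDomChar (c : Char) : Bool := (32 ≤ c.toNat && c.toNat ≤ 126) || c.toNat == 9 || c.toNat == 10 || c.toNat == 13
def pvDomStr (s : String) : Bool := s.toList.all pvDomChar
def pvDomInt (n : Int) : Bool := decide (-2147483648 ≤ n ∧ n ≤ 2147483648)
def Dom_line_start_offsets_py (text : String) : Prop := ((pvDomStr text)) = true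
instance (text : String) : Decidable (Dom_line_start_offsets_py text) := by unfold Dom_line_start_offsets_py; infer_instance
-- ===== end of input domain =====

-- B scans the raw characters once, appending i+1 after each newline to an out seeded with [0],
-- instead of splitting into lines and accumulating substring lengths (objective: simpler).


-- ===== PORT A =====
def line_start_offsets_py (text : String) : List Int :=
  let st := (PySem.Chars.splitOn text.toList ['\n']).foldl
      (fun (st : List Int × Int) line => (st.1 ++ [st.2], st.2 + PySem.Chars.len line + 1)) ([], 0)
  if st.1 = [] then [0] else st.1

-- ===== PORT B =====
def line_start_offsets_py_alt (text : String) : List Int :=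
  (PySem.List.enumerate text.toList 0).foldl
    (fun out ic => if ic.2 = '\n' then out ++ [ic.1 + 1] else out) [0]

-- ===== PRECONDITION & SPEC =====
def Spec_line_start_offsets_py (text : String) (out : List Int) : Prop := out = line_start_offsets_py_alt text
instance (text : String) (out : List Int) : Decidable (Spec_line_start_offsets_py text out) := by unfold Spec_line_start_offsets_py; infer_instance

-- ===== CLAIM (what is proved, stated in full; the proofs are below) =====
def Claim_equal_line_start_offsets_py : Prop := ∀ (text : String), Dom_line_start_offsets_py text → Spec_line_start_offsets_py text (line_start_offsets_py text)

-- ===== LEMMAS AND PROOFS =====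

-- structural single-char split: mySplit c pre s = the pieces of pre++s split at c, pre being the part of the current piece already read
def mySplit (c : Char) (pre : List Char) : List Char → List (List Char)
  | [] => [pre]
  | a :: t => if a = c then pre :: mySplit c [] t else mySplit c (pre ++ [a]) t

theorem go_eq (c : Char) : ∀ (fuel : Nat) (l cur : List Char) (acc : List (List Char)),
    l.length < fuel →
    PySem.Chars.splitOn.go [c] fuel l cur acc = acc.reverse ++ mySplit c cur.reverse l := by
  intro fuel
  induction fuel with
  | zero => intro l cur acc h; omega
  | succ fuel ih =>
    intro l cur acc h
    cases l with
    | nil => simp [PySem.Chars.splitOn.go, mySplit]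
    | cons a t =>
      by_cases hc : a = c
      · subst hc
        rw [PySem.Chars.splitOn.go]
        simp only [List.isPrefixOf, BEq.rfl, Bool.true_and, if_true,
          List.length_cons, List.drop_succ_cons, List.length_nil, List.drop_zero]
        rw [ih t [] (cur.reverse :: acc) (by simpa using Nat.lt_of_succ_lt_succ h)]
        simp [mySplit]
      · rw [PySem.Chars.splitOn.go]
        have : ([c].isPrefixOf (a :: t)) = false := by
          simp [List.isPrefixOf]
          exact fun h' => hc (h' ▸ rfl)
        rw [this]
        simp only [Bool.false_eq_true, if_false]
        rw [ih t (a :: cur) acc (by simpa using Nat.lt_of_succ_lt_succ h)]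
        simp [mySplit, hc]

theorem splitOn_eq_mySplit (c : Char) (s : List Char) :
    PySem.Chars.splitOn s [c] = mySplit c [] s := by
  unfold PySem.Chars.splitOn
  rw [go_eq c (s.length + 1) s [] [] (by omega)]
  simp

def bscan (s : List Char) (i : Int) (out : List Int) : List Int :=
  match s with
  | [] => out
  | ch :: t => bscan t (i + 1) (if ch = '\n' then out ++ [i + 1] else out)

theorem enumerate_foldl_eq_bscan (s : List Char) (i : Int) (out : List Int) :
    (PySem.List.enumerate s i).foldl
      (fun out ic => if ic.2 = '\n' then out ++ [ic.1 + 1] else out) out = bscan s i out := by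
  induction s generalizing i out with
  | nil => simp [PySem.List.enumerate_nil, bscan]
  | cons ch t ih => rw [PySem.List.enumerate_cons]; simp only [List.foldl_cons, bscan]; exact ih _ _

theorem key (c : Char) (hc : c = '\n') : ∀ (s pre : List Char) (out : List Int) (off : Int),
    ((mySplit c pre s).foldl
      (fun (st : List Int × Int) line => (st.1 ++ [st.2], st.2 + PySem.Chars.len line + 1))
      (out, off)).1 = bscan s (off + pre.length) (out ++ [off]) := by
  intro s
  induction s with
  | nil => intro pre out off; simp [mySplit, bscan]
  | cons a t ih =>
    intro pre out off
    by_cases ha : a = c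
    · subst ha; subst hc
      simp only [mySplit, if_true, List.foldl_cons, bscan]
      rw [ih [] (out ++ [off]) (off + PySem.Chars.len pre + 1)]
      simp [PySem.Chars.len]
    · subst hc
      simp only [mySplit, if_neg ha, bscan]
      rw [ih (pre ++ [a]) out off]
      have h2 : off + ((pre ++ [a]).length : Int) = off + (pre.length : Int) + 1 := by
        simp; ring
      rw [h2]

theorem mySplit_foldl_ne_nil (c : Char) (s pre : List Char) (out : List Int) (off : Int) :
    ((mySplit c pre s).foldl
      (fun (st : List Int × Int) line => (st.1 ++ [st.2], st.2 + PySem.Chars.len line + 1))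
      (out, off)).1 ≠ [] := by
  induction s generalizing pre out off with
  | nil => simp [mySplit]
  | cons a t ih =>
    by_cases ha : a = c
    · subst ha; simp only [mySplit, if_true, List.foldl_cons]; exact ih _ _ _
    · simp only [mySplit, if_neg ha]; exact ih _ _ _

-- ===== VERDICT (by name: the statement is the Claim_ definition above) =====
theorem line_start_offsets_py_spec : Claim_equal_line_start_offsets_py := by
  intro text _
  unfold Spec_line_start_offsets_py line_start_offsets_py line_start_offsets_py_alt
  rw [splitOn_eq_mySplit, enumerate_foldl_eq_bscan]
  simp only [if_neg (mySplit_foldl_ne_nil '\n' text.toList [] [] 0)]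
  have := key '\n' rfl text.toList [] [] 0
  simpa using this
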